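-- pv_equiv track=rewrite | github.com/Matthijs-Vossen/comext-harmonisation | src/comext_harmonisation/core/codes.py | chain_periods
-- ===== SOURCE A (Python) =====
-- def chain_periods(origin_year: str | int, target_year: str | int) -> tuple[list[str], str]:
--     origin = int(origin_year)
--     target = int(target_year)
--     if origin == target:
--         return [], "identity"
--     if origin < target:
--         return [f"{year}{year + 1}" for year in range(origin, target)], "a_to_b"
--     return [f"{year}{year + 1}" for year in range(origin - 1, target - 1, -1)], "b_to_a"
-- ===== SOURCE B (Python) =====
-- def _periods(a, b, asc):
--     # year-pair strings for years a .. b-1 (requires a < b),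
--     # in ascending order if asc else descending, by midpoint splitting
--     if b - a == 1:
--         return [f"{a}{a + 1}"]
--     m = (a + b) // 2
--     left = _periods(a, m, asc)
--     right = _periods(m, b, asc)
--     return left + right if asc else right + left
--
--
-- def chain_periods(origin_year, target_year):
--     origin = int(origin_year)
--     target = int(target_year)
--     if origin == target:
--         return [], "identity"
--     if origin < target:
--         return _periods(origin, target, True), "a_to_b"
--     return _periods(target, origin, False), "b_to_a"
-- ===== Notes on version B (the rewrite author's own statement) =====
-- stated objective: alternative
-- what changed: B builds the period list by divide-and-conquer: it splits the year interval at its midpoint, recursively builds each half, and concatenates the halves in direction order (left+right ascending, right+left descending), instead of A's two direction-specific range comprehensions.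
import Mathlib
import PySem

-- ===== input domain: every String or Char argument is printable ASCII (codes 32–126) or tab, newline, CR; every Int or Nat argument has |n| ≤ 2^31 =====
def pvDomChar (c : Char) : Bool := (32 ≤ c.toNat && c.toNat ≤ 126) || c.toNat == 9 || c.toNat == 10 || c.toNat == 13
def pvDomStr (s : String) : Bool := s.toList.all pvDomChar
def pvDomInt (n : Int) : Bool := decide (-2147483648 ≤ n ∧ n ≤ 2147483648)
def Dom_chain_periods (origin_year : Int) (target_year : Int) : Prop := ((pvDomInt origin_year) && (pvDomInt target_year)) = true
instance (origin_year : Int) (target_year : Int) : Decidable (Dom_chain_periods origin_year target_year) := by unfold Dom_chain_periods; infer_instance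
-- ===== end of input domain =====

-- B builds the period list by divide-and-conquer on the year interval (midpoint split,
-- halves concatenated in direction order) instead of A's two direction-specific range
-- comprehensions (objective: alternative).

-- ===== PORT A =====
def chain_periods (origin_year : Int) (target_year : Int) : List String × String :=
  let origin := origin_year
  let target := target_year
  if origin = target then ([], "identity")
  else if origin < target then
    ((PySem.List.pyRange origin target 1).map
      (fun year => PySem.Int.toStr year ++ PySem.Int.toStr (year + 1)), "a_to_b")
  else
    ((PySem.List.pyRange (origin - 1) (target - 1) (-1)).map
      (fun year => PySem.Int.toStr year ++ PySem.Int.toStr (year + 1)), "b_to_a")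

-- ===== PORT B =====
-- _periods a b asc: year-pair strings for years a..b-1 (Python requires a < b; the
-- final 'else []' arm is only a totality guard for b ≤ a, unreachable from the caller).
def pvPeriods (a : Int) (b : Int) (asc : Bool) : List String :=
  if b - a = 1 then [PySem.Int.toStr a ++ PySem.Int.toStr (a + 1)]
  else if a < b then
    let m := PySem.Int.floordiv (a + b) 2
    let left := pvPeriods a m asc
    let right := pvPeriods m b asc
    if asc then left ++ right else right ++ left
  else []
termination_by (b - a).toNat
decreasing_by
  all_goals
    have hm : PySem.Int.floordiv (a + b) 2 = (a + b) / 2 :=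
      PySem.Int.floordiv_eq_ediv_of_pos (by omega)
    omega

def chain_periods_alt (origin_year : Int) (target_year : Int) : List String × String :=
  let origin := origin_year
  let target := target_year
  if origin = target then ([], "identity")
  else if origin < target then (pvPeriods origin target true, "a_to_b")
  else (pvPeriods target origin false, "b_to_a")

-- ===== PRECONDITION & SPEC =====
def Spec_chain_periods (origin_year : Int) (target_year : Int) (out : List String × String) : Prop := out = chain_periods_alt origin_year target_year
instance (origin_year : Int) (target_year : Int) (out : List String × String) : Decidable (Spec_chain_periods origin_year target_year out) := by unfold Spec_chain_periods; infer_instance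

-- ===== CLAIM (what is proved, stated in full; the proofs are below) =====
def Claim_equal_chain_periods : Prop := ∀ (origin_year : Int) (target_year : Int), Dom_chain_periods origin_year target_year → Spec_chain_periods origin_year target_year (chain_periods origin_year target_year)

-- ===== LEMMAS AND PROOFS =====

theorem pvPeriods_asc (a b : Int) (h : a < b) :
    pvPeriods a b true =
      (PySem.List.pyRange a b 1).map
        (fun year => PySem.Int.toStr year ++ PySem.Int.toStr (year + 1)) := by
  rw [pvPeriods]
  by_cases h1 : b - a = 1
  · have hb : b = a + 1 := by omega
    subst hb
    simp [PySem.List.pyRange_one_singleton]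
  · have hm : PySem.Int.floordiv (a + b) 2 = (a + b) / 2 :=
      PySem.Int.floordiv_eq_ediv_of_pos (by omega)
    have ham : a < PySem.Int.floordiv (a + b) 2 := by omega
    have hmb : PySem.Int.floordiv (a + b) 2 < b := by omega
    simp only [h1, if_false, if_pos h, if_true]
    rw [pvPeriods_asc a _ ham, pvPeriods_asc _ b hmb, ← List.map_append,
      ← PySem.List.pyRange_one_append a _ b (le_of_lt ham) (le_of_lt hmb)]
termination_by (b - a).toNat
decreasing_by all_goals omega

theorem pvPeriods_desc (a b : Int) (h : a < b) :
    pvPeriods a b false = (pvPeriods a b true).reverse := by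
  rw [pvPeriods, pvPeriods]
  by_cases h1 : b - a = 1
  · simp [h1]
  · have hm : PySem.Int.floordiv (a + b) 2 = (a + b) / 2 :=
      PySem.Int.floordiv_eq_ediv_of_pos (by omega)
    have ham : a < PySem.Int.floordiv (a + b) 2 := by omega
    have hmb : PySem.Int.floordiv (a + b) 2 < b := by omega
    simp only [h1, if_false, if_pos h, Bool.false_eq_true, if_true]
    rw [pvPeriods_desc a _ ham, pvPeriods_desc _ b hmb, List.reverse_append]
termination_by (b - a).toNat
decreasing_by all_goals omega

-- ===== VERDICT (by name: the statement is the Claim_ definition above) =====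
theorem chain_periods_spec : Claim_equal_chain_periods := by
  intro o t _
  show chain_periods o t = chain_periods_alt o t
  unfold chain_periods chain_periods_alt
  by_cases h1 : o = t
  · simp [h1]
  · simp only [h1, if_false]
    by_cases h2 : o < t
    · simp only [h2, if_true]
      rw [pvPeriods_asc o t h2]
    · have h3 : t < o := by omega
      simp only [h2, if_false]
      rw [pvPeriods_desc t o h3, pvPeriods_asc t o h3, ← List.map_reverse]
      have : PySem.List.pyRange (o - 1) (t - 1) (-1) = (PySem.List.pyRange t o 1).reverse := by
        rw [PySem.List.pyRange_neg_one_eq_reverse, sub_add_cancel, sub_add_cancel]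
      rw [this]
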